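-- pv_equiv track=rewrite | github.com/andyroodee/aoc2024 | day2/b.py | is_safe_report
-- ===== SOURCE A (Python) =====
-- def sign(val):
--     if val < 0:
--         return -1
--     elif val > 0:
--         return 1
--     else:
--         return 0
--
-- def is_safe_report(diffs):
--     dir = sign(diffs[0])
--     for i in range(len(diffs)):
--         valid_diff = abs(diffs[i]) >= 1 and abs(diffs[i]) <= 3
--         seq = dir == sign(diffs[i])
--         if not valid_diff or not seq:
--             return False
--     return True
-- ===== SOURCE B (Python) =====
-- def is_safe_report(diffs):
--     lo = min(diffs)
--     hi = max(diffs)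
--     return (1 <= lo and hi <= 3) or (-3 <= lo and hi <= -1)
-- ===== Notes on version B (the rewrite author's own statement) =====
-- stated objective: alternative
-- what changed: Instead of A's single pass matching each element's sign and magnitude against the first element, B computes the aggregate min and max of the list and decides safety by one range test on those two extremes: all diffs in [1,3] or all in [-3,-1].
-- outside the precondition, e.g. on is_safe_report([]): A raises IndexError, B raises ValueError
import Mathlib
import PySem

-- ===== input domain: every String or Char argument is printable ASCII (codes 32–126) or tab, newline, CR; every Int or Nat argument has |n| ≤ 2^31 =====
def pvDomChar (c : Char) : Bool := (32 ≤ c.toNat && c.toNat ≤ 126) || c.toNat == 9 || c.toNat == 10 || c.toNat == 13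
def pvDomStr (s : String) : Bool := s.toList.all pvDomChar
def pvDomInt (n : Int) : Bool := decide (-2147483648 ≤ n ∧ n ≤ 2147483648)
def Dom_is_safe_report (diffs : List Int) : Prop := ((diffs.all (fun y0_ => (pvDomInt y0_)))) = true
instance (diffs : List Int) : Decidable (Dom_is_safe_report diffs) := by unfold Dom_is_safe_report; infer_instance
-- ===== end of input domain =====

-- B (alternative): decide safety from the aggregate min and max of the list instead of A's per-element sign matching.
-- ===== PORT A =====
def pySign (val : Int) : Int :=
  if val < 0 then -1 else if val > 0 then 1 else 0

-- the for-loop of A: checks each diffs[i] in order against the fixed dir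
def aLoop (dir : Int) : List Int → Bool
  | [] => true
  | d :: rest =>
    let valid_diff := decide (1 ≤ |d|) && decide (|d| ≤ 3)
    let seq := decide (dir = pySign d)
    if !valid_diff || !seq then false else aLoop dir rest

def is_safe_report (diffs : List Int) : Bool :=
  match PySem.List.pyGet? diffs 0 with
  | none => false   -- IndexError in Python; excluded by Pre_
  | some d0 => aLoop (pySign d0) diffs

-- ===== PORT B =====
def is_safe_report_alt (diffs : List Int) : Bool :=
  match PySem.List.min? diffs (fun x => x), PySem.List.max? diffs (fun x => x) with
  | some lo, some hi =>
      (decide (1 ≤ lo) && decide (hi ≤ 3)) || (decide (-3 ≤ lo) && decide (hi ≤ -1))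
  | _, _ => false   -- ValueError in Python (min of empty); excluded by Pre_

-- ===== PRECONDITION & SPEC =====
-- Pre_: on the empty list A raises IndexError (and B raises ValueError); excluded.
def Pre_is_safe_report (diffs : List Int) : Prop := diffs ≠ []
instance (diffs : List Int) : Decidable (Pre_is_safe_report diffs) := by unfold Pre_is_safe_report; infer_instance
def pvWitness_is_safe_report : List Int := [1, 2, 3]

def Spec_is_safe_report (diffs : List Int) (out : Bool) : Prop := out = is_safe_report_alt diffs
instance (diffs : List Int) (out : Bool) : Decidable (Spec_is_safe_report diffs out) := by unfold Spec_is_safe_report; infer_instance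

-- ===== CLAIM =====
def Claim_equal_is_safe_report : Prop := ∀ (diffs : List Int), Dom_is_safe_report diffs → Pre_is_safe_report diffs → Spec_is_safe_report diffs (is_safe_report diffs)

-- ===== LEMMAS AND PROOFS =====

theorem cond_pos (d : Int) :
    (!(decide (1 ≤ |d|) && decide (|d| ≤ 3)) || !decide ((1:Int) = pySign d))
      = !(decide (1 ≤ d) && decide (d ≤ 3)) := by
  rcases abs_cases d with ⟨he, hs⟩ | ⟨he, hs⟩ <;> rw [he] <;> unfold pySign <;>
    split_ifs <;> simp <;> omega

theorem cond_neg (d : Int) :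
    (!(decide (1 ≤ |d|) && decide (|d| ≤ 3)) || !decide ((-1:Int) = pySign d))
      = !(decide (-3 ≤ d) && decide (d ≤ -1)) := by
  rcases abs_cases d with ⟨he, hs⟩ | ⟨he, hs⟩ <;> rw [he] <;> unfold pySign <;>
    split_ifs <;> simp <;> try omega
  all_goals (rw [Bool.eq_iff_iff]; simp; omega)

theorem aLoop_pos (xs : List Int) :
    aLoop 1 xs = xs.all (fun d => decide (1 ≤ d) && decide (d ≤ 3)) := by
  induction xs with
  | nil => rfl
  | cons d rest ih =>
    show (if _ then false else aLoop 1 rest) = _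
    rw [cond_pos]
    cases h : (decide (1 ≤ d) && decide (d ≤ 3)) <;> simp [h, ih]

theorem aLoop_neg (xs : List Int) :
    aLoop (-1) xs = xs.all (fun d => decide (-3 ≤ d) && decide (d ≤ -1)) := by
  induction xs with
  | nil => rfl
  | cons d rest ih =>
    show (if _ then false else aLoop (-1) rest) = _
    rw [cond_neg]
    cases h : (decide (-3 ≤ d) && decide (d ≤ -1)) <;> simp [h, ih]

-- "all elements in [a,b]" is the same as "min ≥ a and max ≤ b"
theorem all_range_iff_minmax (xs : List Int) (lo hi a b : Int)
    (hlo : PySem.List.min? xs (fun x => x) = some lo)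
    (hhi : PySem.List.max? xs (fun x => x) = some hi) :
    xs.all (fun d => decide (a ≤ d) && decide (d ≤ b))
      = (decide (a ≤ lo) && decide (hi ≤ b)) := by
  rw [Bool.eq_iff_iff]
  simp only [List.all_eq_true, Bool.and_eq_true, decide_eq_true_eq]
  constructor
  · intro h
    exact ⟨(h lo (PySem.List.min?_mem hlo)).1, (h hi (PySem.List.max?_mem hhi)).2⟩
  · intro ⟨ha, hb⟩ d hd
    exact ⟨le_trans ha (PySem.List.min?_isMin hlo d hd),
           le_trans (PySem.List.max?_isMax hhi d hd) hb⟩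

-- ===== VERDICT =====
theorem is_safe_report_spec : Claim_equal_is_safe_report := by
  intro diffs _ hpre
  unfold Spec_is_safe_report is_safe_report is_safe_report_alt
  cases diffs with
  | nil => exact absurd rfl hpre
  | cons d0 rest =>
    have hget : PySem.List.pyGet? (d0 :: rest) 0 = some d0 := by
      simp [PySem.List.pyGet?, PySem.List.pyIdx?]
    have hlo : PySem.List.min? (d0 :: rest) (fun x => x) = some (rest.foldl min d0) :=
      PySem.List.min?_id_cons d0 rest
    have hhi : PySem.List.max? (d0 :: rest) (fun x => x) = some (rest.foldl max d0) :=
      PySem.List.max?_id_cons d0 rest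
    set lo := rest.foldl min d0 with hlo_def
    set hi := rest.foldl max d0 with hhi_def
    have hlo0 : lo ≤ d0 := PySem.List.min?_isMin hlo d0 (by simp)
    have hhi0 : d0 ≤ hi := PySem.List.max?_isMax hhi d0 (by simp)
    simp only [hget, hlo, hhi]
    by_cases hpos : d0 > 0
    · have hs : pySign d0 = 1 := by unfold pySign; split_ifs <;> omega
      rw [hs, aLoop_pos, all_range_iff_minmax _ lo hi 1 3 hlo hhi]
      have : decide (hi ≤ (-1:Int)) = false := by simp; omega
      simp [this]
    · by_cases hneg : d0 < 0
      · have hs : pySign d0 = -1 := by unfold pySign; split_ifs <;> omega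
        rw [hs, aLoop_neg, all_range_iff_minmax _ lo hi (-3) (-1) hlo hhi]
        have : decide ((1:Int) ≤ lo) = false := by simp; omega
        simp [this]
      · have h0 : d0 = 0 := by omega
        subst h0
        have h1 : decide ((1:Int) ≤ lo) = false := by simp; omega
        have h2 : decide (hi ≤ (-1:Int)) = false := by simp; omega
        simp [aLoop, pySign, h1, h2]
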